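-- pv_equiv track=rewrite | github.com/dahrb/Inventive_Step_ADM | LLM_Experiments/viz_test.py | map_nodes_to_entries
-- ===== SOURCE A (Python) =====
-- def map_nodes_to_entries(nodes, entries):
--     mapping = {}
--     texts = []
--     for e in entries:
--         texts.append(" ".join(filter(None, [e.get("question") or "", e.get("reasoning") or "", e.get("hidden") or ""])) .lower())
--     for node in nodes:
--         nl = str(node).lower()
--         match = None
--         for idx, t in enumerate(texts):
--             if nl and nl in t:
--                 match = entries[idx]
--                 break
--         mapping[str(node)] = match
--     return mapping
-- ===== SOURCE B (Python) =====
-- def map_nodes_to_entries(nodes, entries):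
--     # entry-major pass: pre-seed the mapping (fixing key order), then scan entries
--     # once, assigning each still-unassigned node to the first entry whose text contains it
--     mapping = {str(n): None for n in nodes}
--     unassigned = [k for k in mapping if k]
--     for entry in entries:
--         text = " ".join(t for t in (entry.get("question"), entry.get("reasoning"), entry.get("hidden")) if t).lower()
--         still = []
--         for k in unassigned:
--             if k.lower() in text:
--                 mapping[k] = entry
--             else:
--                 still.append(k)
--         unassigned = still
--     return mapping
-- ===== Notes on version B (the rewrite author's own statement) =====
-- stated objective: alternative
-- what changed: Inverted the loop nesting: instead of scanning all entry texts per node with an early break, B pre-seeds the ordered mapping with None, then makes one entry-major pass maintaining the list of still-unassigned nodes, assigning each to its first matching entry.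
import Mathlib
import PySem

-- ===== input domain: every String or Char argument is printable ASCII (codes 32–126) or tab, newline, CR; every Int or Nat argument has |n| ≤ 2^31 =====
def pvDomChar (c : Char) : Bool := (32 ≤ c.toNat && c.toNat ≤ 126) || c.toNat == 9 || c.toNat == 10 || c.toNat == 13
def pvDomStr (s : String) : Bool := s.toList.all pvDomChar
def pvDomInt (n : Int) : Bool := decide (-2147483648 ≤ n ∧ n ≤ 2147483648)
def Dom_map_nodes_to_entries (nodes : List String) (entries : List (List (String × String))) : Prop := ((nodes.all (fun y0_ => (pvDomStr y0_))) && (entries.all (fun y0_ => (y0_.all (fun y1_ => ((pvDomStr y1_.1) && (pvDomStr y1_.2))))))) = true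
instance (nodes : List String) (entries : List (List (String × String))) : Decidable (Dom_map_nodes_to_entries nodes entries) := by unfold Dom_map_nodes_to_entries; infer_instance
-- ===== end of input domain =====

-- B makes one entry-major pass over a pre-seeded mapping instead of A's per-node scan
-- of all entry texts (same cost; a different decomposition). Return-value equivalence.


-- ===== PORT A =====
-- " ".join(filter(None, [e.get("question") or "", e.get("reasoning") or "", e.get("hidden") or ""])).lower()
def aText (e : List (String × String)) : String :=
  PySem.Str.lower (PySem.Str.join " "
    (([((PySem.Dict.mk e).get? "question").getD "",
       ((PySem.Dict.mk e).get? "reasoning").getD "",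
       ((PySem.Dict.mk e).get? "hidden").getD ""]).filter (fun t => t != "")))

-- the inner 'for idx, t in enumerate(texts): if nl and nl in t: match = entries[idx]; break'
-- (texts is consumed only index-aligned with entries, so the walk is over texts.zip entries)
def aMatch (nl : String) (pairs : List (String × List (String × String))) :
    Option (List (String × String)) :=
  match pairs with
  | [] => none
  | (t, e) :: rest => if nl != "" && PySem.Str.isIn nl t then some e else aMatch nl rest

def map_nodes_to_entries (nodes : List String) (entries : List (List (String × String))) :
    List (String × Option (List (String × String))) :=
  let texts := entries.foldl (fun ts e => ts ++ [aText e]) []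
  let mapping := nodes.foldl
    (fun (m : PySem.Dict String (Option (List (String × String)))) node =>
      let nl := PySem.Str.lower node
      m.insert node (aMatch nl (texts.zip entries)))
    (PySem.Dict.mk [])
  mapping.items

-- ===== PORT B =====
-- " ".join(t for t in (entry.get("question"), entry.get("reasoning"), entry.get("hidden")) if t).lower()
def bText (e : List (String × String)) : String :=
  PySem.Str.lower (PySem.Str.join " "
    ((([(PySem.Dict.mk e).get? "question", (PySem.Dict.mk e).get? "reasoning",
        (PySem.Dict.mk e).get? "hidden"]).filterMap id).filter (fun t => t != "")))

-- one step of the inner 'for k in unassigned' loop: assign or keep for the next round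
def bStep (text : String) (e : List (String × String))
    (p : PySem.Dict String (Option (List (String × String))) × List String) (k : String) :
    PySem.Dict String (Option (List (String × String))) × List String :=
  if PySem.Str.isIn (PySem.Str.lower k) text then (p.1.insert k (some e), p.2)
  else (p.1, p.2 ++ [k])

def map_nodes_to_entries_alt (nodes : List String) (entries : List (List (String × String))) :
    List (String × Option (List (String × String))) :=
  let mapping0 := nodes.foldl
    (fun (m : PySem.Dict String (Option (List (String × String)))) n => m.insert n none)
    (PySem.Dict.mk [])
  let unassigned := mapping0.keys.filter (fun k => k != "")
  let final := entries.foldl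
    (fun p e =>
      let text := bText e
      p.2.foldl (bStep text e) (p.1, []))
    (mapping0, unassigned)
  final.1.items

-- ===== PRECONDITION & SPEC =====
def Spec_map_nodes_to_entries (nodes : List String) (entries : List (List (String × String))) (out : List (String × Option (List (String × String)))) : Prop := out = map_nodes_to_entries_alt nodes entries
instance (nodes : List String) (entries : List (List (String × String))) (out : List (String × Option (List (String × String)))) : Decidable (Spec_map_nodes_to_entries nodes entries out) := by unfold Spec_map_nodes_to_entries; infer_instance

-- ===== CLAIM (what is proved, stated in full; the proofs are below) =====
def Claim_equal_map_nodes_to_entries : Prop := ∀ (nodes : List String) (entries : List (List (String × String))), Dom_map_nodes_to_entries nodes entries → Spec_map_nodes_to_entries nodes entries (map_nodes_to_entries nodes entries)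

-- ===== LEMMAS AND PROOFS =====

-- the two text builds agree
theorem aText_eq_bText (e : List (String × String)) : aText e = bText e := by
  unfold aText bText
  rcases hq : (PySem.Dict.mk e).get? "question" with _ | q <;>
    rcases hr : (PySem.Dict.mk e).get? "reasoning" with _ | r <;>
    rcases hh : (PySem.Dict.mk e).get? "hidden" with _ | h <;>
    simp [List.filterMap, List.filter]

-- whether entry e's text contains node k (lowered)
def hitB (k : String) (e : List (String × String)) : Bool :=
  PySem.Str.isIn (PySem.Str.lower k) (bText e)

theorem lower_eq_empty_iff (s : String) : PySem.Str.lower s = "" ↔ s = "" := by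
  constructor
  · intro h
    have h2 := congrArg String.toList h
    rw [PySem.Str.toList_lower] at h2
    simp [PySem.Chars.lower] at h2
    exact h2
  · intro h; subst h; decide

theorem lower_bne_empty (k : String) : (PySem.Str.lower k != "") = (k != "") := by
  by_cases h : k = ""
  · subst h
    rw [(lower_eq_empty_iff "").mpr rfl]
  · have h2 : PySem.Str.lower k ≠ "" := fun hc => h ((lower_eq_empty_iff k).mp hc)
    rw [bne_iff_ne.mpr h2, bne_iff_ne.mpr h]

theorem aMatch_eq_find? (k : String) (es : List (List (String × String))) :
    aMatch (PySem.Str.lower k) ((es.map aText).zip es)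
      = if k = "" then none else es.find? (hitB k) := by
  induction es with
  | nil => simp [aMatch]
  | cons e rest ih =>
    simp only [List.map_cons, List.zip_cons_cons, aMatch]
    rw [lower_bne_empty, aText_eq_bText]
    by_cases hk : k = ""
    · subst hk
      rw [show (("" : String) != "") = false from rfl, Bool.false_and]
      rw [if_neg (show ¬ (false = true) from by simp), ih, if_pos rfl, if_pos rfl]
    · have hne : (k != "") = true := bne_iff_ne.mpr hk
      rw [hne, Bool.true_and, if_neg hk]
      by_cases hh : hitB k e = true
      · rw [if_pos (show PySem.Str.isIn (PySem.Str.lower k) (bText e) = true from hh),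
          List.find?_cons_of_pos hh]
      · have hh2 : ¬ PySem.Str.isIn (PySem.Str.lower k) (bText e) = true := hh
        rw [if_neg hh2, List.find?_cons_of_neg hh, ih, if_neg hk]

-- a dict whose items are exactly its keys paired through f, after pure-value inserts
theorem items_foldl_insert_fun (f : String → Option (List (String × String)))
    (ns : List String) (d : PySem.Dict String (Option (List (String × String))))
    (h : d.items = d.keys.map (fun k => (k, f k))) :
    (ns.foldl (fun m n => m.insert n (f n)) d).items
      = (ns.foldl (fun m n => m.insert n (f n)) d).keys.map (fun k => (k, f k)) := by
  induction ns generalizing d with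
  | nil => simpa using h
  | cons n rest ih =>
    simp only [List.foldl_cons]
    apply ih
    by_cases hc : d.contains n = true
    · rw [PySem.Dict.items_insert, if_pos hc, PySem.Dict.keys_insert_of_contains d _ hc, h,
        List.map_map]
      refine List.map_congr_left (fun k _ => ?_)
      by_cases hk : k = n
      · subst hk; simp
      · simp [Function.comp, hk]
    · have hc2 : d.contains n = false := by simpa using hc
      rw [PySem.Dict.items_insert, if_neg (by simp [hc2]),
        PySem.Dict.keys_insert_of_not_contains d _ hc2, h]
      simp

-- inner loop of B over the unassigned list
theorem bInner (e : List (String × String)) (un : List String)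
    (d : PySem.Dict String (Option (List (String × String)))) (acc : List String)
    (v : String → Option (List (String × String)))
    (hd : d.items = d.keys.map (fun k => (k, v k)))
    (hsub : ∀ k ∈ un, k ∈ d.keys) :
    (un.foldl (bStep (bText e) e) (d, acc)).1.keys = d.keys ∧
    (un.foldl (bStep (bText e) e) (d, acc)).1.items
      = d.keys.map (fun k => (k, if k ∈ un ∧ hitB k e = true then some e else v k)) ∧
    (un.foldl (bStep (bText e) e) (d, acc)).2 = acc ++ un.filter (fun k => !hitB k e) := by
  induction un generalizing d acc v with
  | nil =>
    refine ⟨rfl, ?_, by simp⟩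
    simpa using hd
  | cons k rest ih =>
    have hkmem : k ∈ d.keys := hsub k (by simp)
    have hrest : ∀ k' ∈ rest, k' ∈ d.keys := fun k' h' => hsub k' (by simp [h'])
    by_cases hh : hitB k e = true
    · have hc : d.contains k = true := (PySem.Dict.contains_iff_mem_keys d k).mpr hkmem
      have hkeys' : (d.insert k (some e)).keys = d.keys :=
        PySem.Dict.keys_insert_of_contains d _ hc
      have hd' : (d.insert k (some e)).items
          = (d.insert k (some e)).keys.map
              (fun k' => (k', if k' = k then some e else v k')) := by
        rw [PySem.Dict.items_insert, if_pos hc, hkeys', hd, List.map_map]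
        refine List.map_congr_left (fun k' _ => ?_)
        by_cases hk' : k' = k
        · subst hk'; simp
        · simp [Function.comp, hk']
      obtain ⟨h1, h2, h3⟩ := ih (d.insert k (some e)) acc
        (fun k' => if k' = k then some e else v k') hd'
        (by rw [hkeys']; exact hrest)
      have hhc : PySem.Str.isIn (PySem.Str.lower k) (bText e) = true := hh
      simp only [List.foldl_cons, bStep]
      rw [if_pos hhc]
      refine ⟨h1.trans hkeys', ?_, by rw [h3]; simp [hh]⟩
      rw [h2, hkeys']
      refine List.map_congr_left (fun k' _ => ?_)
      by_cases hk' : k' = k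
      · subst hk'; simp [hh]
      · by_cases hm : k' ∈ rest <;> simp [hk', hm]
    · have hh2 : hitB k e = false := by simpa using hh
      obtain ⟨h1, h2, h3⟩ := ih d (acc ++ [k]) v hd hrest
      have hhc : ¬ PySem.Str.isIn (PySem.Str.lower k) (bText e) = true := hh
      simp only [List.foldl_cons, bStep]
      rw [if_neg hhc]
      refine ⟨h1, ?_, ?_⟩
      · rw [h2]
        refine List.map_congr_left (fun k' _ => ?_)
        by_cases hk' : k' = k
        · subst hk'; simp [hh2]
        · by_cases hm : k' ∈ rest <;> simp [hk', hm]
      · rw [h3]; simp [hh2]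

-- outer loop of B over the entries
theorem bOuter (es : List (List (String × String))) (un : List String)
    (d : PySem.Dict String (Option (List (String × String))))
    (v : String → Option (List (String × String)))
    (hd : d.items = d.keys.map (fun k => (k, v k)))
    (hsub : ∀ k ∈ un, k ∈ d.keys) :
    (es.foldl (fun p e => p.2.foldl (bStep (bText e) e) (p.1, ([] : List String))) (d, un)).1.items
      = d.keys.map (fun k => (k,
          if k ∈ un then
            (match es.find? (hitB k) with | some e => some e | none => v k)
          else v k)) := by
  induction es generalizing d un v with
  | nil =>
    simp only [List.foldl_nil]
    rw [hd]
    refine List.map_congr_left (fun k _ => ?_)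
    by_cases hm : k ∈ un <;> simp [hm, List.find?_nil]
  | cons e rest ih =>
    simp only [List.foldl_cons]
    obtain ⟨h1, h2, h3⟩ := bInner e un d [] v hd hsub
    rcases hs : un.foldl (bStep (bText e) e) (d, ([] : List String)) with ⟨d1, un1⟩
    rw [hs] at h1 h2 h3
    simp only [List.nil_append] at h3
    have hd1 : d1.items = d1.keys.map
        (fun k => (k, if k ∈ un ∧ hitB k e = true then some e else v k)) := by
      show (d1, un1).1.items = _
      rw [h2]
      show d.keys.map _ = (d1, un1).1.keys.map _
      rw [h1]
    have hsub1 : ∀ k ∈ un1, k ∈ d1.keys := by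
      intro k hk
      show k ∈ (d1, un1).1.keys
      rw [h1]
      have : k ∈ un.filter (fun k => !hitB k e) := by rw [← h3]; exact hk
      exact hsub k (List.mem_filter.mp this).1
    have hgoal := ih un1 d1 _ hd1 hsub1
    rw [hgoal]
    rw [show d1.keys = d.keys from h1]
    refine List.map_congr_left (fun k _ => ?_)
    have hun1 : k ∈ un1 ↔ k ∈ un ∧ hitB k e = false := by
      rw [h3]; simp
    by_cases hm : k ∈ un
    · by_cases hh : hitB k e = true
      · have hnm : k ∉ un1 := fun hc => by
          have h4 := (hun1.mp hc).2
          rw [hh] at h4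
          exact absurd h4 (by decide)
        simp [hnm, hm, hh]
      · have hh2 : hitB k e = false := by simpa using hh
        have hm1 : k ∈ un1 := hun1.mpr ⟨hm, hh2⟩
        cases hf : rest.find? (hitB k) <;>
          simp [hm1, hm, hh2, hf]
    · have hnm : k ∉ un1 := fun hc => hm (hun1.mp hc).1
      simp [hnm, hm]

-- ===== VERDICT (by name: the statement is the Claim_ definition above) =====
theorem map_nodes_to_entries_spec : Claim_equal_map_nodes_to_entries := by
  intro nodes entries _
  unfold Spec_map_nodes_to_entries
  unfold map_nodes_to_entries map_nodes_to_entries_alt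
  simp only [PySem.List.foldl_append_singleton_eq_map, List.nil_append]
  rw [items_foldl_insert_fun
        (fun node => aMatch (PySem.Str.lower node) ((entries.map aText).zip entries))
        nodes (PySem.Dict.mk []) rfl]
  rw [bOuter entries
        (((nodes.foldl (fun m n => m.insert n none) (PySem.Dict.mk [])).keys).filter
          (fun k => k != ""))
        (nodes.foldl (fun m n => m.insert n none) (PySem.Dict.mk []))
        (fun _ => none)
        (items_foldl_insert_fun (fun _ => none) nodes (PySem.Dict.mk []) rfl)
        (fun k hk => (List.mem_filter.mp hk).1)]
  rw [PySem.Dict.keys_foldl_insert nodes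
        (fun _ node => aMatch (PySem.Str.lower node) ((entries.map aText).zip entries))
        (PySem.Dict.mk [])]
  rw [PySem.Dict.keys_foldl_insert nodes (fun _ _ => none) (PySem.Dict.mk [])]
  refine List.map_congr_left (fun k hkK => ?_)
  rw [aMatch_eq_find? k entries]
  by_cases hk : k = ""
  · simp [hk, List.mem_filter]
  · have hkn : k ∈ nodes := by
      simpa [PySem.Set.update_nil_left, PySem.Set.mem_ofList] using hkK
    have hbk : (k != "") = true := bne_iff_ne.mpr hk
    simp [hk, hbk, hkn]
    cases entries.find? (hitB k) <;> rfl
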